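-- pv_equiv track=rewrite | github.com/Dearj611/Foram_Tagger_Team43_Software | projectsite/image_segmentation.py | sort_by_extremes
-- ===== SOURCE A (Python) =====
-- def sort_by_extremes(arr):
--     '''
--     a = [1,3,6,2,9,19] becomes
--     a = [1,19,2,9,3,6]
--     Helper function for remove_outliers
--     '''
--     arr = sorted(arr)
--     to_return = []
--     i = 0
--     while arr != []:
--         if i % 2 == 0:
--             to_return.append(arr.pop(0))
--         else:
--             to_return.append(arr.pop())
--         i += 1
--     return to_return
-- ===== SOURCE B (Python) =====
-- def sort_by_extremes(arr):
--     s = sorted(arr)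
--     n = len(s)
--     return [s[k // 2] if k % 2 == 0 else s[n - 1 - k // 2] for k in range(n)]
-- ===== Notes on version B (the rewrite author's own statement) =====
-- stated objective: faster
-- what changed: Replaces the quadratic-time while loop that repeatedly pops from the front of the sorted list with a single comprehension indexing directly into the sorted list (position k takes s[k//2] from the low end or s[n-1-k//2] from the high end).
import Mathlib
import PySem

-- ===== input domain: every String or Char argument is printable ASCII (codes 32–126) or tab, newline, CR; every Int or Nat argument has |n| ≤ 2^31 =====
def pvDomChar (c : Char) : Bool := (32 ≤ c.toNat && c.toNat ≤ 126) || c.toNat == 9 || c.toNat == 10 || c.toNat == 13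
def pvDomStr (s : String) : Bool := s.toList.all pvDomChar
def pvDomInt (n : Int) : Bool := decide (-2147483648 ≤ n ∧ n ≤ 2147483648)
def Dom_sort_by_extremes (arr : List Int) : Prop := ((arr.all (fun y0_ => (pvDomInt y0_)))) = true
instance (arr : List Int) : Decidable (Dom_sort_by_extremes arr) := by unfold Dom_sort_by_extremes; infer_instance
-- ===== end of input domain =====

-- B replaces A's quadratic pop-from-front loop by direct indexing into the sorted list: faster (asymptotic).
-- ===== PORT A =====
-- A's loop: pop front on even steps, pop back on odd steps
def pvGoA : List Int → Nat → List Int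
  | [], _ => []
  | y :: ys, i =>
    if i % 2 = 0 then y :: pvGoA ys (i + 1)
    else (y :: ys).getLast (by simp) :: pvGoA (y :: ys).dropLast (i + 1)
termination_by xs _ => xs.length
decreasing_by
  · simp
  · simp

def sort_by_extremes (arr : List Int) : List Int :=
  pvGoA (PySem.List.sorted arr (fun x => x) false) 0

-- ===== PORT B =====
def sort_by_extremes_alt (arr : List Int) : List Int :=
  let s := PySem.List.sorted arr (fun x => x) false
  let n := s.length
  (List.range n).map (fun k => if k % 2 = 0 then s.getD (k / 2) 0 else s.getD (n - 1 - k / 2) 0)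


-- ===== PRECONDITION & SPEC =====
def Spec_sort_by_extremes (arr : List Int) (out : List Int) : Prop := out = sort_by_extremes_alt arr
instance (arr : List Int) (out : List Int) : Decidable (Spec_sort_by_extremes arr out) := by unfold Spec_sort_by_extremes; infer_instance

-- ===== CLAIM (what is proved, stated in full; the proofs are below) =====
def Claim_equal_sort_by_extremes : Prop := ∀ (arr : List Int), Dom_sort_by_extremes arr → Spec_sort_by_extremes arr (sort_by_extremes arr)

-- ===== LEMMAS AND PROOFS =====
lemma pvGoA_parity (xs : List Int) (i j : Nat) (h : i % 2 = j % 2) : pvGoA xs i = pvGoA xs j := by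
  induction xs, i using pvGoA.induct generalizing j with
  | case1 i => simp [pvGoA]
  | case2 y ys i hi ih =>
    rw [pvGoA, pvGoA, if_pos hi, if_pos (h ▸ hi), ih (j+1) (by omega)]
  | case3 y ys i hi ih =>
    rw [pvGoA, pvGoA, if_neg hi, if_neg (h ▸ hi), ih (j+1) (by omega)]

lemma pvGoA_eq_map (n : Nat) : ∀ s : List Int, s.length = n →
    pvGoA s 0 = (List.range n).map
      (fun k => if k % 2 = 0 then s.getD (k / 2) 0 else s.getD (n - 1 - k / 2) 0) := by
  induction n using Nat.strong_induction_on with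
  | _ n ih =>
    match n with
    | 0 =>
      intro s hs
      have : s = [] := List.eq_nil_of_length_eq_zero hs
      subst this; simp [pvGoA]
    | 1 =>
      intro s hs
      have hne : s ≠ [] := by rintro rfl; simp at hs
      obtain ⟨a, rest, rfl⟩ := List.exists_cons_of_ne_nil hne
      have : rest = [] := by simpa using hs
      subst this
      simp [pvGoA, List.range_succ]
    | (m+2) =>
      intro s hs
      have hne : s ≠ [] := by rintro rfl; simp at hs
      obtain ⟨a, rest, rfl⟩ := List.exists_cons_of_ne_nil hne
      have hrl : rest.length = m + 1 := by simpa using hs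
      have hrest : rest ≠ [] := by intro h; simp [h] at hrl
      obtain ⟨r, rs, hrr⟩ := List.exists_cons_of_ne_nil hrest
      have hml : rest.dropLast.length = m := by simp [hrl]
      have hdec : rest.dropLast ++ [rest.getLast hrest] = rest :=
        List.dropLast_append_getLast hrest
      have step1 : pvGoA (a :: rest) 0 = a :: pvGoA rest 1 := by
        rw [pvGoA]; simp
      have step2 : pvGoA rest 1 = rest.getLast hrest :: pvGoA rest.dropLast 0 := by
        subst hrr
        rw [pvGoA]
        simp [pvGoA_parity (r :: rs).dropLast 2 0 (by omega)]
      rw [step1, step2, ih m (by omega) rest.dropLast hml]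
      have hrange : List.range (m+2) = 0 :: 1 :: (List.range m).map (fun k => k + 2) := by
        rw [List.range_succ_eq_map, List.range_succ_eq_map]
        simp only [List.map_cons, List.map_map]
        refine congrArg _ (congrArg _ ?_)
        exact List.map_congr_left (fun k _ => by simp [Function.comp])
      rw [hrange]
      simp only [List.map_cons, List.map_map]
      refine List.cons_eq_cons.mpr ⟨?_, List.cons_eq_cons.mpr ⟨?_, ?_⟩⟩
      · simp
      · -- index m+1 of a :: rest is the last element
        have h1 : (m + 2 - 1 - 1 / 2) = m + 1 := by omega
        simp only [if_neg (by omega : ¬ (1 % 2 = 0)), h1, List.getD_cons_succ]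
        conv_rhs => rw [← hdec]
        rw [List.getD_append_right _ _ _ _ (by omega), hml]
        simp
      · apply List.map_congr_left
        intro k hk
        have hkm : k < m := List.mem_range.mp hk
        simp only [Function.comp]
        by_cases hpar : k % 2 = 0
        · have hp2 : (k + 2) % 2 = 0 := by omega
          simp only [if_pos hpar, if_pos hp2]
          have h2 : (k + 2) / 2 = k / 2 + 1 := by omega
          rw [h2, List.getD_cons_succ, ← hdec,
            List.getD_append _ _ _ _ (by omega), List.dropLast_concat]
        · have hp2 : ¬ ((k + 2) % 2 = 0) := by omega
          simp only [if_neg hpar, if_neg hp2]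
          have h2 : (m + 2 - 1 - (k + 2) / 2) = (m - 1 - k / 2) + 1 := by omega
          rw [h2, List.getD_cons_succ, ← hdec,
            List.getD_append _ _ _ _ (by omega), List.dropLast_concat]

-- ===== VERDICT (by name: the statement is the Claim_ definition above) =====
theorem sort_by_extremes_spec : Claim_equal_sort_by_extremes := by
  intro arr _
  unfold Spec_sort_by_extremes sort_by_extremes sort_by_extremes_alt
  exact pvGoA_eq_map _ _ rfl
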